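-- pv_equiv track=rewrite | github.com/xipponk/tuul-sim-labs | DistanceVectorInteractive.py | distance_vector_step
-- ===== SOURCE A (Python) =====
-- import copy
--
-- def distance_vector_step(graph, dv):
--     updated = False
--     changed_cells = set()
--     nodes = list(graph.keys())
--     new_dv = copy.deepcopy(dv)
--
--     for x in nodes:
--         for v in graph[x]:  # each neighbor
--             for y in nodes:  # each destination
--                 alt = graph[x][v] + dv[v][y]
--                 if alt < new_dv[x][y]:
--                     new_dv[x][y] = alt
--                     changed_cells.add((x, y))
--                     updated = True
--     return new_dv, updated, changed_cells
-- ===== SOURCE B (Python) =====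
-- import copy
--
-- def distance_vector_step(graph, dv):
--     # B: closed-form relaxation per cell (min over neighbor candidates), then a
--     # separate diff pass computing the changed cells; no incremental flag/update logic.
--     nodes = list(graph.keys())
--     new_dv = copy.deepcopy(dv)
--     for x in nodes:
--         for y in nodes:
--             cands = [graph[x][v] + dv[v][y] for v in graph[x]]
--             if cands:
--                 new_dv[x][y] = min(dv[x][y], min(cands))
--     changed_cells = {(x, y) for x in nodes for y in nodes
--                      if graph[x] and new_dv[x][y] < dv[x][y]}
--     return new_dv, bool(changed_cells), changed_cells
-- ===== Notes on version B (the rewrite author's own statement) =====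
-- stated objective: alternative
-- what changed: A relaxes incrementally inside a triple loop, mutating new_dv and maintaining updated/changed_cells as it goes; B computes each cell once in closed form as min(dv[x][y], min over neighbors of graph[x][v]+dv[v][y]) and then derives changed_cells and updated in a separate diff pass comparing new_dv with dv.
import Mathlib
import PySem

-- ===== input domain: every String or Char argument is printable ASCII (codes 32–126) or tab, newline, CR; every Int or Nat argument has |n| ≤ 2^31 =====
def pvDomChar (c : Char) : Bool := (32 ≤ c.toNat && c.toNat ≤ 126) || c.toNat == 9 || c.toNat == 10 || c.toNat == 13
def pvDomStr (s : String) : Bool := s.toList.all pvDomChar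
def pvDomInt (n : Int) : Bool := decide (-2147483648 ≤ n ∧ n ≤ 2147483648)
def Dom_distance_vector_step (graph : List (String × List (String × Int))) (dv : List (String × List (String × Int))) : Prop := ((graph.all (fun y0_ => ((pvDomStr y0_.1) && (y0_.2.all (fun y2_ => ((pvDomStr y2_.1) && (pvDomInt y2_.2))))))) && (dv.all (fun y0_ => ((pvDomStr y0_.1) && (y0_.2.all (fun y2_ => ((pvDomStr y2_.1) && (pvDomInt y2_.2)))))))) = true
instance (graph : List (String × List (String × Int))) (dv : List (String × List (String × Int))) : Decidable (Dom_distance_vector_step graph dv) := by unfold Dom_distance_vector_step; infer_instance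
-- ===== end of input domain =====

-- B recomputes each cell by a closed-form min over the neighbor candidates and derives the
-- changed-cell set in a separate diff pass (objective: alternative decomposition, same cost).
-- Python's set iteration order is hash-based and not modelled (PYSEM.md): both ports serialize
-- the returned set deterministically in nodes×nodes scan order — exact as a set.

-- ===== PORT A =====
-- shared dict-of-dicts accessors (Python d[x], d[x][y] reads and d[x][y] = a writes)
def pvRow (m : List (String × List (String × Int))) (x : String) : List (String × Int) :=
  (PySem.Dict.mk m).getD x []
def pvCell (m : List (String × List (String × Int))) (x y : String) : Int :=
  (PySem.Dict.mk (pvRow m x)).getD y 0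
def pvSetCell (m : List (String × List (String × Int))) (x y : String) (a : Int) :
    List (String × List (String × Int)) :=
  ((PySem.Dict.mk m).modify x [] (fun r => ((PySem.Dict.mk r).insert y a).items)).items
def pvVs (graph : List (String × List (String × Int))) (x : String) : List String :=
  (PySem.Dict.mk (pvRow graph x)).keys

-- body of A's innermost loop: 'alt = graph[x][v] + dv[v][y]; if alt < new_dv[x][y]: …'
def pvStepA (graph dv : List (String × List (String × Int))) (x v : String)
    (st : (List (String × List (String × Int))) × Bool × PySem.Set (String × String)) (y : String) :
    (List (String × List (String × Int))) × Bool × PySem.Set (String × String) :=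
  let alt := pvCell graph x v + pvCell dv v y
  if alt < pvCell st.1 x y then (pvSetCell st.1 x y alt, true, PySem.Set.add st.2.2 (x, y))
  else st

-- 'for v in graph[x]: for y in nodes: …'
def pvLoopV (graph dv : List (String × List (String × Int))) (x : String)
    (st : (List (String × List (String × Int))) × Bool × PySem.Set (String × String)) (v : String) :
    (List (String × List (String × Int))) × Bool × PySem.Set (String × String) :=
  ((PySem.Dict.mk graph).keys).foldl (pvStepA graph dv x v) st

def pvLoopX (graph dv : List (String × List (String × Int)))
    (st : (List (String × List (String × Int))) × Bool × PySem.Set (String × String)) (x : String) :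
    (List (String × List (String × Int))) × Bool × PySem.Set (String × String) :=
  (pvVs graph x).foldl (pvLoopV graph dv x) st

def distance_vector_step (graph : List (String × List (String × Int))) (dv : List (String × List (String × Int))) : (List (String × List (String × Int))) × Bool × (List (String × String)) :=
  let nodes := (PySem.Dict.mk graph).keys
  let st := nodes.foldl (pvLoopX graph dv) (dv, false, (PySem.Set.empty : PySem.Set (String × String)))
  -- the returned set is serialized in deterministic nodes×nodes scan order (exact as a set)
  (st.1, st.2.1,
    nodes.flatMap (fun x => (nodes.filter (fun y => PySem.Set.contains st.2.2 (x, y))).map (fun y => (x, y))))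

-- ===== PORT B =====
-- body of B's first pass: 'cands = [graph[x][v] + dv[v][y] for v in graph[x]];
-- if cands: new_dv[x][y] = min(dv[x][y], min(cands))'  (min ported as PySem.List.min?,
-- none exactly when cands is empty, i.e. the 'if cands:' guard)
def pvStepB (graph dv : List (String × List (String × Int))) (x : String)
    (m : List (String × List (String × Int))) (y : String) : List (String × List (String × Int)) :=
  let cands := (pvVs graph x).map (fun v => pvCell graph x v + pvCell dv v y)
  match PySem.List.min? cands (fun z => z) with
  | none => m
  | some c => pvSetCell m x y (min (pvCell dv x y) c)

def distance_vector_step_alt (graph : List (String × List (String × Int))) (dv : List (String × List (String × Int))) : (List (String × List (String × Int))) × Bool × (List (String × String)) :=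
  let nodes := (PySem.Dict.mk graph).keys
  let new_dv := nodes.foldl (fun m x => nodes.foldl (pvStepB graph dv x) m) dv
  -- '{(x, y) for x in nodes for y in nodes if graph[x] and new_dv[x][y] < dv[x][y]}'
  -- (set comprehension = Set.ofList of the generated pairs, in the same scan order)
  let changed : PySem.Set (String × String) := PySem.Set.ofList
    (nodes.flatMap (fun x => (nodes.filter
        (fun y => !(pvRow graph x).isEmpty && decide (pvCell new_dv x y < pvCell dv x y))).map (fun y => (x, y))))
  (new_dv, !changed.isEmpty, changed)

-- ===== PRECONDITION & SPEC =====
-- Pre_ = exactly the inputs where Python A raises no KeyError: every row/cell the triple loop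
-- reads or writes is present. The Nodup conjuncts only state that the association lists encode
-- dicts (a Python dict always has distinct keys), so they exclude no representable input.
def Pre_distance_vector_step (graph : List (String × List (String × Int))) (dv : List (String × List (String × Int))) : Prop :=
  (graph.map Prod.fst).Nodup ∧ (dv.map Prod.fst).Nodup ∧
  (∀ p ∈ dv, (p.2.map Prod.fst).Nodup) ∧
  (∀ p ∈ graph, p.2 ≠ [] →
    p.1 ∈ dv.map Prod.fst ∧
    (∀ y ∈ graph.map Prod.fst, y ∈ (pvRow dv p.1).map Prod.fst) ∧
    (∀ q ∈ p.2, q.1 ∈ dv.map Prod.fst ∧ ∀ y ∈ graph.map Prod.fst, y ∈ (pvRow dv q.1).map Prod.fst))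
instance (graph : List (String × List (String × Int))) (dv : List (String × List (String × Int))) : Decidable (Pre_distance_vector_step graph dv) := by unfold Pre_distance_vector_step; infer_instance

def pvWitness_distance_vector_step : (List (String × List (String × Int))) × (List (String × List (String × Int))) :=
  ([("a", [("b", 1)]), ("b", [])],
   [("a", [("a", 0), ("b", 5)]), ("b", [("a", 9), ("b", 0)])])

def Spec_distance_vector_step (graph : List (String × List (String × Int))) (dv : List (String × List (String × Int))) (out : (List (String × List (String × Int))) × Bool × (List (String × String))) : Prop := out = distance_vector_step_alt graph dv
instance (graph : List (String × List (String × Int))) (dv : List (String × List (String × Int))) (out : (List (String × List (String × Int))) × Bool × (List (String × String))) : Decidable (Spec_distance_vector_step graph dv out) := by unfold Spec_distance_vector_step; infer_instance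

-- ===== CLAIM (what is proved, stated in full; the proofs are below) =====
def Claim_equal_distance_vector_step : Prop := ∀ (graph : List (String × List (String × Int))) (dv : List (String × List (String × Int))), Dom_distance_vector_step graph dv → Pre_distance_vector_step graph dv → Spec_distance_vector_step graph dv (distance_vector_step graph dv)

-- ===== LEMMAS AND PROOFS =====

-- proof-side notions: candidate value, relaxed (closed-form) value, changed-cell predicate
def pvCand (graph dv : List (String × List (String × Int))) (x v y : String) : Int :=
  pvCell graph x v + pvCell dv v y
def pvRelax (graph dv : List (String × List (String × Int))) (x y : String) : Int :=
  ((pvVs graph x).map (fun v => pvCand graph dv x v y)).foldl min (pvCell dv x y)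
def pvChanged (graph dv : List (String × List (String × Int))) (x y : String) : Prop :=
  ∃ v ∈ pvVs graph x, pvCand graph dv x v y < pvCell dv x y

-- shape: same outer keys in the same order, and rowwise the same inner keys in the same order
def pvShape (dv m : List (String × List (String × Int))) : Prop :=
  List.Forall₂ (fun p q => p.1 = q.1 ∧ p.2.map Prod.fst = q.2.map Prod.fst) dv m

theorem pvCell_setCell (m : List (String × List (String × Int))) (x y : String) (a : Int)
    (x' y' : String) :
    pvCell (pvSetCell m x y a) x' y' = if x' = x ∧ y' = y then a else pvCell m x' y' := by
  unfold pvCell pvSetCell pvRow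
  rw [show (PySem.Dict.mk ((PySem.Dict.mk m).modify x [] (fun r => ((PySem.Dict.mk r).insert y a).items)).items) = (PySem.Dict.mk m).modify x [] (fun r => ((PySem.Dict.mk r).insert y a).items) from rfl]
  rw [PySem.Dict.getD_modify]
  by_cases hx : x' = x
  · rw [if_pos hx]
    rw [show (PySem.Dict.mk ((PySem.Dict.mk ((PySem.Dict.mk m).getD x [])).insert y a).items) = ((PySem.Dict.mk ((PySem.Dict.mk m).getD x [])).insert y a) from rfl]
    rw [PySem.Dict.getD_insert]
    by_cases hy : y' = y
    · rw [if_pos hy, if_pos ⟨hx, hy⟩]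
    · rw [if_neg hy, if_neg (by tauto), hx]
  · rw [if_neg hx, if_neg (by tauto)]

theorem pvRow_cons (p : String × List (String × Int)) (t : List (String × List (String × Int)))
    (x : String) : pvRow (p :: t) x = if p.1 = x then p.2 else pvRow t x := by
  simp only [pvRow, PySem.Dict.getD, PySem.Dict.get?, List.find?_cons]
  by_cases h : p.1 = x
  · simp [h]
  · simp [h, beq_false_of_ne h]

theorem pvSetCell_cons_ne (q : String × List (String × Int))
    (mt : List (String × List (String × Int))) (x y : String) (a : Int) (h : q.1 ≠ x) :
    pvSetCell (q :: mt) x y a = q :: pvSetCell mt x y a := by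
  unfold pvSetCell
  have hrow : (PySem.Dict.mk (q :: mt)).getD x [] = (PySem.Dict.mk mt).getD x [] := by
    have := pvRow_cons q mt x
    simp only [pvRow] at this
    rw [this, if_neg h]
  simp only [PySem.Dict.modify, hrow]
  have hcc : (PySem.Dict.mk (q :: mt)).contains x = (PySem.Dict.mk mt).contains x := by
    simp [PySem.Dict.contains, beq_false_of_ne h]
  by_cases hc : (PySem.Dict.mk mt).contains x = true
  · rw [PySem.Dict.items_insert_of_contains (PySem.Dict.mk (q :: mt)) _ (hcc.trans hc),
        PySem.Dict.items_insert_of_contains (PySem.Dict.mk mt) _ hc]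
    simp only [List.map_cons]
    congr 1
    rw [if_neg (by simp [beq_false_of_ne h])]
  · rw [PySem.Dict.items_insert_of_not_contains (PySem.Dict.mk (q :: mt)) _
          (by rw [hcc]; simp only [Bool.not_eq_true] at hc; exact hc),
        PySem.Dict.items_insert_of_not_contains (PySem.Dict.mk mt) _ (by simp only [Bool.not_eq_true] at hc; exact hc)]
    rfl

theorem pvSetCell_cons_eq (q : String × List (String × Int))
    (mt : List (String × List (String × Int))) (x y : String) (a : Int) (h : q.1 = x)
    (hmt : x ∉ mt.map Prod.fst) :
    pvSetCell (q :: mt) x y a = (x, ((PySem.Dict.mk q.2).insert y a).items) :: mt := by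
  unfold pvSetCell
  have hrow : (PySem.Dict.mk (q :: mt)).getD x [] = q.2 := by
    have := pvRow_cons q mt x
    simp only [pvRow] at this
    rw [this, if_pos h]
  simp only [PySem.Dict.modify, hrow]
  have hcont : (PySem.Dict.mk (q :: mt)).contains x = true := by
    simp [PySem.Dict.contains, h]
  rw [PySem.Dict.items_insert_of_contains _ _ hcont]
  simp only [List.map_cons]
  congr 1
  · rw [if_pos (by simp [h])]
  · have : ∀ p ∈ mt, (if (p.1 == x) = true then (x, ((PySem.Dict.mk q.2).insert y a).items) else p) = p := by
      intro p hp
      rw [if_neg]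
      simp only [beq_eq_false_iff_ne, ne_eq, Bool.not_eq_true]
      intro hpx
      exact hmt (List.mem_map.mpr ⟨p, hp, by simpa using hpx⟩)
    rw [List.map_congr_left this]
    simp

theorem pvRow_eq_nil_of_not_mem (m : List (String × List (String × Int))) (x : String)
    (h : x ∉ m.map Prod.fst) : pvRow m x = [] := by
  induction m with
  | nil => rfl
  | cons p t ih =>
    rw [pvRow_cons]
    rw [List.map_cons, List.mem_cons] at h
    rw [not_or] at h
    rw [if_neg (fun hh => h.1 hh.symm), ih h.2]

theorem pvShape_refl (dv : List (String × List (String × Int))) : pvShape dv dv :=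
  List.forall₂_same.mpr (fun _ _ => ⟨rfl, rfl⟩)

theorem pvShape_keys {dv m : List (String × List (String × Int))} (h : pvShape dv m) :
    m.map Prod.fst = dv.map Prod.fst := by
  induction h with
  | nil => rfl
  | cons hpq _ ih => simp [ih, hpq.1]

theorem pvInsert_row_keys (r : List (String × Int)) (y : String) (a : Int)
    (hy : y ∈ r.map Prod.fst) :
    (((PySem.Dict.mk r).insert y a).items).map Prod.fst = r.map Prod.fst := by
  have hc : (PySem.Dict.mk r).contains y = true := by
    rcases List.mem_map.mp hy with ⟨p, hp, hpy⟩
    simp only [PySem.Dict.contains, List.any_eq_true]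
    exact ⟨p, hp, by simp [hpy]⟩
  rw [PySem.Dict.items_insert_of_contains _ _ hc]
  rw [List.map_map]
  apply List.map_congr_left
  intro p _
  by_cases hpy : p.1 = y
  · simp [hpy]
  · simp [hpy]

theorem pvShape_setCell {dv m : List (String × List (String × Int))} (h : pvShape dv m)
    (hnd : (dv.map Prod.fst).Nodup) (x y : String) (a : Int)
    (hx : x ∈ dv.map Prod.fst) (hy : y ∈ (pvRow dv x).map Prod.fst) :
    pvShape dv (pvSetCell m x y a) := by
  induction h with
  | nil => simp at hx
  | @cons p q dvt mt hpq htail ih =>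
    rw [List.map_cons, List.nodup_cons] at hnd
    by_cases hqx : q.1 = x
    · have hpx : p.1 = x := hpq.1.trans hqx
      have hxmt : x ∉ mt.map Prod.fst := by
        rw [pvShape_keys htail]
        exact fun hm => hnd.1 (hpx ▸ hm)
      rw [pvSetCell_cons_eq q mt x y a hqx hxmt]
      refine List.Forall₂.cons ⟨hpx, ?_⟩ htail
      have hrowdv : pvRow (p :: dvt) x = p.2 := by rw [pvRow_cons, if_pos hpx]
      rw [hrowdv] at hy
      rw [pvInsert_row_keys q.2 y a (hpq.2 ▸ hy), hpq.2]
    · rw [pvSetCell_cons_ne q mt x y a hqx]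
      have hpx : p.1 ≠ x := fun hh => hqx (hpq.1 ▸ hh)
      have hx' : x ∈ dvt.map Prod.fst := by
        rw [List.map_cons, List.mem_cons] at hx
        rcases hx with h1 | h1
        · exact absurd h1.symm hpx
        · exact h1
      have hy' : y ∈ (pvRow dvt x).map Prod.fst := by
        rwa [pvRow_cons, if_neg hpx] at hy
      exact List.Forall₂.cons hpq (ih hnd.2 hx' hy')

theorem pvRowGetD_cons (p : String × Int) (t : List (String × Int)) (z : String) :
    (PySem.Dict.mk (p :: t)).getD z 0 = if p.1 = z then p.2 else (PySem.Dict.mk t).getD z 0 := by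
  simp only [PySem.Dict.getD, PySem.Dict.get?, List.find?_cons]
  by_cases h : p.1 = z
  · simp [h]
  · simp [h, beq_false_of_ne h]

theorem pvRowGetD_of_not_mem (r : List (String × Int)) (z : String)
    (h : z ∉ r.map Prod.fst) : (PySem.Dict.mk r).getD z 0 = 0 := by
  induction r with
  | nil => rfl
  | cons p t ih =>
    rw [pvRowGetD_cons]
    rw [List.map_cons, List.mem_cons] at h
    rw [not_or] at h
    rw [if_neg (fun hh => h.1 hh.symm), ih h.2]

theorem pvRowExt (r1 : List (String × Int)) : ∀ (r2 : List (String × Int)),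
    r1.map Prod.fst = r2.map Prod.fst → (r1.map Prod.fst).Nodup →
    (∀ y, (PySem.Dict.mk r1).getD y 0 = (PySem.Dict.mk r2).getD y 0) → r1 = r2 := by
  induction r1 with
  | nil =>
    intro r2 hk _ _
    exact (List.map_eq_nil_iff.mp hk.symm).symm ▸ rfl
  | cons p t1 ih =>
    intro r2 hk hnd hv
    cases r2 with
    | nil => simp at hk
    | cons q t2 =>
      simp only [List.map_cons, List.cons_eq_cons] at hk
      rw [List.map_cons, List.nodup_cons] at hnd
      have hval : p.2 = q.2 := by
        have := hv p.1
        rw [pvRowGetD_cons, pvRowGetD_cons, if_pos rfl, if_pos hk.1.symm] at this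
        exact this
      have htl : t1 = t2 := by
        apply ih t2 hk.2 hnd.2
        intro z
        by_cases hz : z = p.1
        · subst hz
          rw [pvRowGetD_of_not_mem t1 _ hnd.1, pvRowGetD_of_not_mem t2 _ (hk.2 ▸ hnd.1)]
        · have := hv z
          rw [pvRowGetD_cons, pvRowGetD_cons, if_neg (fun hh => hz hh.symm),
            if_neg (fun hh => hz (hk.1 ▸ hh).symm)] at this
          exact this
      have hhead : p = q := Prod.ext hk.1.symm.symm hval
      rw [hhead, htl]

theorem pvEq_of_shape_cell {dv : List (String × List (String × Int))} :
    ∀ {m1 m2 : List (String × List (String × Int))},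
    (dv.map Prod.fst).Nodup → (∀ p ∈ dv, (p.2.map Prod.fst).Nodup) →
    pvShape dv m1 → pvShape dv m2 →
    (∀ x y, pvCell m1 x y = pvCell m2 x y) → m1 = m2 := by
  induction dv with
  | nil =>
    intro m1 m2 _ _ h1 h2 _
    cases h1; cases h2; rfl
  | cons p dvt ih =>
    intro m1 m2 hnd hrows h1 h2 hc
    cases h1 with
    | cons hpq1 ht1 =>
      cases h2 with
      | cons hpq2 ht2 =>
        rename_i q1 m1t q2 m2t
        rw [List.map_cons, List.nodup_cons] at hnd
        have hrow1 : pvRow (q1 :: m1t) p.1 = q1.2 := by rw [pvRow_cons, if_pos hpq1.1.symm]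
        have hrow2 : pvRow (q2 :: m2t) p.1 = q2.2 := by rw [pvRow_cons, if_pos hpq2.1.symm]
        have hq : q1 = q2 := by
          have hk : q1.2.map Prod.fst = q2.2.map Prod.fst := hpq1.2.symm.trans hpq2.2
          have hv : ∀ y, (PySem.Dict.mk q1.2).getD y 0 = (PySem.Dict.mk q2.2).getD y 0 := by
            intro y
            have := hc p.1 y
            unfold pvCell at this
            rwa [hrow1, hrow2] at this
          have hnd1 : (q1.2.map Prod.fst).Nodup := hpq1.2 ▸ hrows p (List.mem_cons_self ..)
          have h22 : q1.2 = q2.2 := pvRowExt q1.2 q2.2 hk hnd1 hv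
          exact Prod.ext (hpq1.1.symm.trans hpq2.1) h22
        have htl : m1t = m2t := by
          apply ih hnd.2 (fun r hr => hrows r (List.mem_cons_of_mem _ hr)) ht1 ht2
          intro x y
          by_cases hx : x = p.1
          · subst hx
            have e1 : pvRow m1t p.1 = [] :=
              pvRow_eq_nil_of_not_mem _ _ (by rw [pvShape_keys ht1]; exact hnd.1)
            have e2 : pvRow m2t p.1 = [] :=
              pvRow_eq_nil_of_not_mem _ _ (by rw [pvShape_keys ht2]; exact hnd.1)
            unfold pvCell
            rw [e1, e2]
          · have := hc x y
            unfold pvCell at this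
            rw [pvRow_cons, pvRow_cons, if_neg (fun hh => hx (hpq1.1 ▸ hh).symm),
              if_neg (fun hh => hx (hpq2.1 ▸ hh).symm)] at this
            exact this
        rw [hq, htl]

theorem pvStepA_cell (graph dv : List (String × List (String × Int))) (x v y : String)
    (st : (List (String × List (String × Int))) × Bool × PySem.Set (String × String))
    (x' y' : String) :
    pvCell (pvStepA graph dv x v st y).1 x' y' =
      if x' = x ∧ y' = y ∧ pvCand graph dv x v y < pvCell st.1 x y then pvCand graph dv x v y
      else pvCell st.1 x' y' := by
  unfold pvStepA pvCand
  by_cases hf : pvCell graph x v + pvCell dv v y < pvCell st.1 x y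
  · simp only [if_pos hf]
    rw [pvCell_setCell]
    by_cases hxy : x' = x ∧ y' = y
    · rw [if_pos hxy, if_pos ⟨hxy.1, hxy.2, hf⟩]
    · rw [if_neg hxy, if_neg (by tauto)]
  · simp only [if_neg hf]
    rw [if_neg (by tauto)]

theorem pvFoldY_cell (graph dv : List (String × List (String × Int))) (x v : String)
    (ys : List String) (hys : ys.Nodup) :
    ∀ (st : (List (String × List (String × Int))) × Bool × PySem.Set (String × String))
      (x' y' : String),
    pvCell (ys.foldl (pvStepA graph dv x v) st).1 x' y' =
      if x' = x ∧ y' ∈ ys ∧ pvCand graph dv x v y' < pvCell st.1 x y' then pvCand graph dv x v y'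
      else pvCell st.1 x' y' := by
  induction ys with
  | nil => intro st x' y'; rw [if_neg (by simp)]; rfl
  | cons y ys' ih =>
    rw [List.nodup_cons] at hys
    intro st x' y'
    rw [List.foldl_cons, ih hys.2]
    by_cases hx : x' = x
    · rw [hx]
      by_cases hy : y' = y
      · rw [if_neg (fun h => hys.1 (hy ▸ h.2.1)), pvStepA_cell, hy]
        by_cases hf : pvCand graph dv x v y < pvCell st.1 x y
        · rw [if_pos ⟨rfl, rfl, hf⟩, if_pos ⟨rfl, List.mem_cons_self .., hf⟩]
        · rw [if_neg (by tauto), if_neg (by rintro ⟨-, -, h⟩; exact hf h)]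
      · have hEq : pvCell (pvStepA graph dv x v st y).1 x y' = pvCell st.1 x y' := by
          rw [pvStepA_cell, if_neg (fun h => hy h.2.1)]
        rw [hEq]
        by_cases hm : y' ∈ ys' ∧ pvCand graph dv x v y' < pvCell st.1 x y'
        · rw [if_pos ⟨rfl, hm.1, hm.2⟩, if_pos ⟨rfl, List.mem_cons_of_mem _ hm.1, hm.2⟩]
        · rw [if_neg (by tauto), if_neg (by simp only [List.mem_cons]; tauto)]
    · have hEq : pvCell (pvStepA graph dv x v st y).1 x' y' = pvCell st.1 x' y' := by
        rw [pvStepA_cell, if_neg (by tauto)]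
      rw [if_neg (by tauto), if_neg (by tauto), hEq]

theorem pvStepA_mem (graph dv : List (String × List (String × Int))) (x v y : String)
    (st : (List (String × List (String × Int))) × Bool × PySem.Set (String × String))
    (p : String × String) :
    p ∈ (pvStepA graph dv x v st y).2.2 ↔
      p ∈ st.2.2 ∨ (p = (x, y) ∧ pvCand graph dv x v y < pvCell st.1 x y) := by
  unfold pvStepA
  by_cases hf : pvCell graph x v + pvCell dv v y < pvCell st.1 x y
  · simp only [if_pos hf]
    rw [PySem.Set.mem_add]
    unfold pvCand
    tauto
  · simp only [if_neg hf]
    unfold pvCand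
    tauto

theorem pvStepA_flag (graph dv : List (String × List (String × Int))) (x v y : String)
    (st : (List (String × List (String × Int))) × Bool × PySem.Set (String × String)) :
    ((pvStepA graph dv x v st y).2.1 = true) ↔
      st.2.1 = true ∨ pvCand graph dv x v y < pvCell st.1 x y := by
  unfold pvStepA pvCand
  by_cases hf : pvCell graph x v + pvCell dv v y < pvCell st.1 x y
  · simp only [if_pos hf]; tauto
  · simp only [if_neg hf]; tauto

theorem pvFoldY_mem (graph dv : List (String × List (String × Int))) (x v : String)
    (ys : List String) (hys : ys.Nodup) :
    ∀ (st : (List (String × List (String × Int))) × Bool × PySem.Set (String × String))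
      (p : String × String),
    p ∈ ((ys.foldl (pvStepA graph dv x v) st)).2.2 ↔
      p ∈ st.2.2 ∨ (p.1 = x ∧ p.2 ∈ ys ∧ pvCand graph dv x v p.2 < pvCell st.1 x p.2) := by
  induction ys with
  | nil => intro st p; simp
  | cons y ys' ih =>
    rw [List.nodup_cons] at hys
    intro st p
    rw [List.foldl_cons, ih hys.2]
    constructor
    · rintro (h | ⟨h1, h2, h3⟩)
      · rcases (pvStepA_mem graph dv x v y st p).mp h with h' | ⟨hp, hf⟩
        · exact Or.inl h'
        · subst hp
          exact Or.inr ⟨rfl, List.mem_cons_self .., hf⟩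
      · have hne : p.2 ≠ y := fun hh => hys.1 (hh ▸ h2)
        rw [pvStepA_cell, if_neg (fun hh => hne hh.2.1)] at h3
        exact Or.inr ⟨h1, List.mem_cons_of_mem _ h2, h3⟩
    · rintro (h | ⟨h1, h2, h3⟩)
      · exact Or.inl ((pvStepA_mem graph dv x v y st p).mpr (Or.inl h))
      · rcases List.mem_cons.mp h2 with hpy | hpy
        · exact Or.inl ((pvStepA_mem graph dv x v y st p).mpr
            (Or.inr ⟨Prod.ext h1 hpy, hpy ▸ h3⟩))
        · have hne : p.2 ≠ y := fun hh => hys.1 (hh ▸ hpy)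
          refine Or.inr ⟨h1, hpy, ?_⟩
          rw [pvStepA_cell, if_neg (fun hh => hne hh.2.1)]
          exact h3

theorem pvFoldY_flag (graph dv : List (String × List (String × Int))) (x v : String)
    (ys : List String) (hys : ys.Nodup) :
    ∀ (st : (List (String × List (String × Int))) × Bool × PySem.Set (String × String)),
    (((ys.foldl (pvStepA graph dv x v) st)).2.1 = true) ↔
      st.2.1 = true ∨ ∃ y' ∈ ys, pvCand graph dv x v y' < pvCell st.1 x y' := by
  induction ys with
  | nil => intro st; simp
  | cons y ys' ih =>
    rw [List.nodup_cons] at hys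
    intro st
    rw [List.foldl_cons, ih hys.2]
    have hEx : (∃ y' ∈ ys', pvCand graph dv x v y' <
        pvCell (pvStepA graph dv x v st y).1 x y') ↔
        (∃ y' ∈ ys', pvCand graph dv x v y' < pvCell st.1 x y') := by
      refine exists_congr fun y' => and_congr_right fun hy' => ?_
      rw [pvStepA_cell, if_neg (by rintro ⟨-, h2, -⟩; exact hys.1 (h2 ▸ hy'))]
    rw [hEx, pvStepA_flag]
    simp only [List.mem_cons]
    constructor
    · rintro ((h | h) | ⟨y', hy', h⟩)
      · exact Or.inl h
      · exact Or.inr ⟨y, Or.inl rfl, h⟩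
      · exact Or.inr ⟨y', Or.inr hy', h⟩
    · rintro (h | ⟨y', hy' | hy', h⟩)
      · exact Or.inl (Or.inl h)
      · exact Or.inl (Or.inr (hy' ▸ h))
      · exact Or.inr ⟨y', hy', h⟩

theorem pvFoldV_cell (graph dv : List (String × List (String × Int))) (x : String)
    (ys : List String) (hys : ys.Nodup) :
    ∀ (vs : List String)
      (st : (List (String × List (String × Int))) × Bool × PySem.Set (String × String))
      (x' y' : String),
    pvCell ((vs.foldl (fun st v => ys.foldl (pvStepA graph dv x v) st) st)).1 x' y' =
      if x' = x ∧ y' ∈ ys then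
        (vs.map (fun v => pvCand graph dv x v y')).foldl min (pvCell st.1 x y')
      else pvCell st.1 x' y' := by
  intro vs
  induction vs with
  | nil =>
    intro st x' y'
    by_cases h : x' = x ∧ y' ∈ ys
    · rw [if_pos h, List.foldl_nil, List.map_nil, List.foldl_nil, h.1]
    · rw [if_neg h, List.foldl_nil]
  | cons v vs' ih =>
    intro st x' y'
    rw [List.foldl_cons, ih]
    by_cases h : x' = x ∧ y' ∈ ys
    · rw [if_pos h, if_pos h]
      have hcell : pvCell (ys.foldl (pvStepA graph dv x v) st).1 x y' =
          min (pvCell st.1 x y') (pvCand graph dv x v y') := by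
        rw [pvFoldY_cell graph dv x v ys hys]
        by_cases hf : pvCand graph dv x v y' < pvCell st.1 x y'
        · rw [if_pos ⟨rfl, h.2, hf⟩, min_def]; omega
        · rw [if_neg (by tauto), min_def]; omega
      rw [hcell, List.map_cons, List.foldl_cons]
    · rw [if_neg h, if_neg h]
      rw [pvFoldY_cell graph dv x v ys hys, if_neg (by tauto)]

theorem pvFoldV_mem (graph dv : List (String × List (String × Int))) (x : String)
    (ys : List String) (hys : ys.Nodup) :
    ∀ (vs : List String)
      (st : (List (String × List (String × Int))) × Bool × PySem.Set (String × String))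
      (p : String × String),
    p ∈ ((vs.foldl (fun st v => ys.foldl (pvStepA graph dv x v) st) st)).2.2 ↔
      p ∈ st.2.2 ∨ (p.1 = x ∧ p.2 ∈ ys ∧ ∃ v ∈ vs, pvCand graph dv x v p.2 < pvCell st.1 x p.2) := by
  intro vs
  induction vs with
  | nil => intro st p; simp
  | cons v vs' ih =>
    intro st p
    rw [List.foldl_cons, ih]
    rw [pvFoldY_mem graph dv x v ys hys]
    have hcell : ∀ (hy : p.2 ∈ ys), pvCell (ys.foldl (pvStepA graph dv x v) st).1 x p.2 =
        min (pvCell st.1 x p.2) (pvCand graph dv x v p.2) := by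
      intro hy
      rw [pvFoldY_cell graph dv x v ys hys]
      by_cases hf : pvCand graph dv x v p.2 < pvCell st.1 x p.2
      · rw [if_pos ⟨rfl, hy, hf⟩, min_def]; omega
      · rw [if_neg (by tauto), min_def]; omega
    constructor
    · rintro ((h | ⟨h1, h2, h3⟩) | ⟨h1, h2, v', hv', h3⟩)
      · exact Or.inl h
      · exact Or.inr ⟨h1, h2, v, List.mem_cons_self .., h3⟩
      · rw [hcell h2] at h3
        by_cases hf : pvCand graph dv x v p.2 < pvCell st.1 x p.2
        · exact Or.inr ⟨h1, h2, v, List.mem_cons_self .., hf⟩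
        · refine Or.inr ⟨h1, h2, v', List.mem_cons_of_mem _ hv', ?_⟩
          calc pvCand graph dv x v' p.2 < min (pvCell st.1 x p.2) (pvCand graph dv x v p.2) := h3
          _ ≤ pvCell st.1 x p.2 := min_le_left _ _
    · rintro (h | ⟨h1, h2, v', hv', h3⟩)
      · exact Or.inl (Or.inl h)
      · rcases List.mem_cons.mp hv' with hv | hv
        · exact Or.inl (Or.inr ⟨h1, h2, hv ▸ h3⟩)
        · by_cases hf : pvCand graph dv x v p.2 < pvCell st.1 x p.2
          · exact Or.inl (Or.inr ⟨h1, h2, hf⟩)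
          · refine Or.inr ⟨h1, h2, v', hv, ?_⟩
            rw [hcell h2]
            rw [min_def]
            split_ifs <;> omega

theorem pvFoldV_flag (graph dv : List (String × List (String × Int))) (x : String)
    (ys : List String) (hys : ys.Nodup) :
    ∀ (vs : List String)
      (st : (List (String × List (String × Int))) × Bool × PySem.Set (String × String)),
    (((vs.foldl (fun st v => ys.foldl (pvStepA graph dv x v) st) st)).2.1 = true) ↔
      st.2.1 = true ∨ ∃ y' ∈ ys, ∃ v ∈ vs, pvCand graph dv x v y' < pvCell st.1 x y' := by
  intro vs
  induction vs with
  | nil => intro st; simp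
  | cons v vs' ih =>
    intro st
    rw [List.foldl_cons, ih, pvFoldY_flag graph dv x v ys hys]
    have hcell : ∀ y', y' ∈ ys → pvCell (ys.foldl (pvStepA graph dv x v) st).1 x y' =
        min (pvCell st.1 x y') (pvCand graph dv x v y') := by
      intro y' hy
      rw [pvFoldY_cell graph dv x v ys hys]
      by_cases hf : pvCand graph dv x v y' < pvCell st.1 x y'
      · rw [if_pos ⟨rfl, hy, hf⟩, min_def]; omega
      · rw [if_neg (by tauto), min_def]; omega
    constructor
    · rintro ((h | ⟨y', hy', h⟩) | ⟨y', hy', v', hv', h⟩)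
      · exact Or.inl h
      · exact Or.inr ⟨y', hy', v, List.mem_cons_self .., h⟩
      · rw [hcell y' hy'] at h
        by_cases hf : pvCand graph dv x v y' < pvCell st.1 x y'
        · exact Or.inr ⟨y', hy', v, List.mem_cons_self .., hf⟩
        · refine Or.inr ⟨y', hy', v', List.mem_cons_of_mem _ hv', ?_⟩
          calc pvCand graph dv x v' y' < min (pvCell st.1 x y') (pvCand graph dv x v y') := h
          _ ≤ pvCell st.1 x y' := min_le_left _ _
    · rintro (h | ⟨y', hy', v', hv', h⟩)
      · exact Or.inl (Or.inl h)
      · rcases List.mem_cons.mp hv' with hv | hv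
        · exact Or.inl (Or.inr ⟨y', hy', hv ▸ h⟩)
        · by_cases hf : pvCand graph dv x v y' < pvCell st.1 x y'
          · exact Or.inl (Or.inr ⟨y', hy', hf⟩)
          · refine Or.inr ⟨y', hy', v', hv, ?_⟩
            rw [hcell y' hy', min_def]
            split_ifs <;> omega


theorem pvFoldY_shape (graph dv : List (String × List (String × Int))) (x v : String)
    (hnd : (dv.map Prod.fst).Nodup) (hx : x ∈ dv.map Prod.fst) :
    ∀ (ys : List String), (∀ y ∈ ys, y ∈ (pvRow dv x).map Prod.fst) →
    ∀ (st : (List (String × List (String × Int))) × Bool × PySem.Set (String × String)),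
    pvShape dv st.1 → pvShape dv (ys.foldl (pvStepA graph dv x v) st).1 := by
  intro ys
  induction ys with
  | nil => intro _ st h; exact h
  | cons y ys' ih =>
    intro hy st h
    rw [List.foldl_cons]
    refine ih (fun z hz => hy z (List.mem_cons_of_mem _ hz)) _ ?_
    unfold pvStepA
    by_cases hf : pvCell graph x v + pvCell dv v y < pvCell st.1 x y
    · rw [if_pos hf]
      exact pvShape_setCell h hnd x y _ hx (hy y (List.mem_cons_self ..))
    · rw [if_neg hf]; exact h

theorem pvFoldV_shape (graph dv : List (String × List (String × Int))) (x : String)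
    (hnd : (dv.map Prod.fst).Nodup) (hx : x ∈ dv.map Prod.fst)
    (ys : List String) (hy : ∀ y ∈ ys, y ∈ (pvRow dv x).map Prod.fst) :
    ∀ (vs : List String)
      (st : (List (String × List (String × Int))) × Bool × PySem.Set (String × String)),
    pvShape dv st.1 →
    pvShape dv ((vs.foldl (fun st v => ys.foldl (pvStepA graph dv x v) st) st)).1 := by
  intro vs
  induction vs with
  | nil => intro st h; exact h
  | cons v vs' ih =>
    intro st h
    rw [List.foldl_cons]
    exact ih _ (pvFoldY_shape graph dv x v hnd hx ys hy st h)

theorem pvFoldX_shape (graph dv : List (String × List (String × Int)))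
    (hnd : (dv.map Prod.fst).Nodup) :
    ∀ (xs : List String),
    (∀ x ∈ xs, pvVs graph x ≠ [] → x ∈ dv.map Prod.fst ∧
      ∀ y ∈ (PySem.Dict.mk graph).keys, y ∈ (pvRow dv x).map Prod.fst) →
    ∀ (st : (List (String × List (String × Int))) × Bool × PySem.Set (String × String)),
    pvShape dv st.1 → pvShape dv ((xs.foldl (pvLoopX graph dv) st)).1 := by
  intro xs
  induction xs with
  | nil => intro _ st h; exact h
  | cons x xs' ih =>
    intro hpre st h
    rw [List.foldl_cons]
    refine ih (fun z hz => hpre z (List.mem_cons_of_mem _ hz)) _ ?_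
    by_cases hv : pvVs graph x = []
    · show pvShape dv (pvLoopX graph dv st x).1
      unfold pvLoopX
      rw [hv, List.foldl_nil]
      exact h
    · rcases hpre x (List.mem_cons_self ..) hv with ⟨hx, hy⟩
      exact pvFoldV_shape graph dv x hnd hx _ hy (pvVs graph x) st h

theorem pvFoldX_cell (graph dv : List (String × List (String × Int)))
    (hnodes : ((PySem.Dict.mk graph).keys).Nodup) :
    ∀ (xs : List String), xs.Nodup →
    ∀ (st : (List (String × List (String × Int))) × Bool × PySem.Set (String × String)),
    (∀ x ∈ xs, ∀ y, pvCell st.1 x y = pvCell dv x y) →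
    ∀ x' y', pvCell ((xs.foldl (pvLoopX graph dv) st)).1 x' y' =
      if x' ∈ xs ∧ y' ∈ (PySem.Dict.mk graph).keys then pvRelax graph dv x' y'
      else pvCell st.1 x' y' := by
  intro xs
  induction xs with
  | nil => intro _ st _ x' y'; rw [if_neg (by simp), List.foldl_nil]
  | cons x xs' ih =>
    intro hxs st hfresh x' y'
    rw [List.nodup_cons] at hxs
    rw [List.foldl_cons]
    have hcell : ∀ a b, pvCell (pvLoopX graph dv st x).1 a b =
        if a = x ∧ b ∈ (PySem.Dict.mk graph).keys then
          ((pvVs graph x).map (fun v => pvCand graph dv x v b)).foldl min (pvCell st.1 x b)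
        else pvCell st.1 a b :=
      pvFoldV_cell graph dv x _ hnodes (pvVs graph x) st
    have hfresh' : ∀ z ∈ xs', ∀ y, pvCell (pvLoopX graph dv st x).1 z y = pvCell dv z y := by
      intro z hz y
      rw [hcell, if_neg (by rintro ⟨h1, -⟩; exact hxs.1 (h1 ▸ hz))]
      exact hfresh z (List.mem_cons_of_mem _ hz) y
    rw [ih hxs.2 _ hfresh' x' y']
    by_cases hmem : x' ∈ xs' ∧ y' ∈ (PySem.Dict.mk graph).keys
    · rw [if_pos hmem, if_pos ⟨List.mem_cons_of_mem _ hmem.1, hmem.2⟩]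
    · rw [if_neg hmem, hcell]
      by_cases hx' : x' = x ∧ y' ∈ (PySem.Dict.mk graph).keys
      · rw [if_pos hx', if_pos ⟨List.mem_cons.mpr (Or.inl hx'.1), hx'.2⟩]
        rw [hfresh x (List.mem_cons_self ..) y', hx'.1]
        rfl
      · rw [if_neg hx', if_neg (by simp only [List.mem_cons]; tauto)]

theorem pvFoldX_mem (graph dv : List (String × List (String × Int)))
    (hnodes : ((PySem.Dict.mk graph).keys).Nodup) :
    ∀ (xs : List String), xs.Nodup →
    ∀ (st : (List (String × List (String × Int))) × Bool × PySem.Set (String × String)),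
    (∀ x ∈ xs, ∀ y, pvCell st.1 x y = pvCell dv x y) →
    ∀ (p : String × String), p ∈ ((xs.foldl (pvLoopX graph dv) st)).2.2 ↔
      p ∈ st.2.2 ∨ (p.1 ∈ xs ∧ p.2 ∈ (PySem.Dict.mk graph).keys ∧ pvChanged graph dv p.1 p.2) := by
  intro xs
  induction xs with
  | nil => intro _ st _ p; simp
  | cons x xs' ih =>
    intro hxs st hfresh p
    rw [List.nodup_cons] at hxs
    rw [List.foldl_cons]
    have hcell : ∀ a b, pvCell (pvLoopX graph dv st x).1 a b =
        if a = x ∧ b ∈ (PySem.Dict.mk graph).keys then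
          ((pvVs graph x).map (fun v => pvCand graph dv x v b)).foldl min (pvCell st.1 x b)
        else pvCell st.1 a b :=
      pvFoldV_cell graph dv x _ hnodes (pvVs graph x) st
    have hfresh' : ∀ z ∈ xs', ∀ y, pvCell (pvLoopX graph dv st x).1 z y = pvCell dv z y := by
      intro z hz y
      rw [hcell, if_neg (by rintro ⟨h1, -⟩; exact hxs.1 (h1 ▸ hz))]
      exact hfresh z (List.mem_cons_of_mem _ hz) y
    rw [ih hxs.2 _ hfresh' p]
    have hmem : p ∈ (pvLoopX graph dv st x).2.2 ↔
        p ∈ st.2.2 ∨ (p.1 = x ∧ p.2 ∈ (PySem.Dict.mk graph).keys ∧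
          ∃ v ∈ pvVs graph x, pvCand graph dv x v p.2 < pvCell st.1 x p.2) :=
      pvFoldV_mem graph dv x _ hnodes (pvVs graph x) st p
    have hch : ∀ (h1 : p.1 = x),
        (∃ v ∈ pvVs graph x, pvCand graph dv x v p.2 < pvCell st.1 x p.2) ↔
        pvChanged graph dv p.1 p.2 := by
      intro h1
      rw [hfresh x (List.mem_cons_self ..) p.2]
      unfold pvChanged
      rw [h1]
    constructor
    · rintro (h | ⟨h1, h2, h3⟩)
      · rcases hmem.mp h with h' | ⟨h1, h2, h3⟩
        · exact Or.inl h'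
        · exact Or.inr ⟨h1 ▸ List.mem_cons_self .., h2, (hch h1).mp h3⟩
      · exact Or.inr ⟨List.mem_cons_of_mem _ h1, h2, h3⟩
    · rintro (h | ⟨h1, h2, h3⟩)
      · exact Or.inl (hmem.mpr (Or.inl h))
      · rcases List.mem_cons.mp h1 with hx1 | hx1
        · exact Or.inl (hmem.mpr (Or.inr ⟨hx1, h2, (hch hx1).mpr h3⟩))
        · exact Or.inr ⟨hx1, h2, h3⟩

theorem pvFoldX_flag (graph dv : List (String × List (String × Int)))
    (hnodes : ((PySem.Dict.mk graph).keys).Nodup) :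
    ∀ (xs : List String), xs.Nodup →
    ∀ (st : (List (String × List (String × Int))) × Bool × PySem.Set (String × String)),
    (∀ x ∈ xs, ∀ y, pvCell st.1 x y = pvCell dv x y) →
    (((xs.foldl (pvLoopX graph dv) st)).2.1 = true ↔
      st.2.1 = true ∨ ∃ x ∈ xs, ∃ y ∈ (PySem.Dict.mk graph).keys, pvChanged graph dv x y) := by
  intro xs
  induction xs with
  | nil => intro _ st _; simp
  | cons x xs' ih =>
    intro hxs st hfresh
    rw [List.nodup_cons] at hxs
    rw [List.foldl_cons]
    have hcell : ∀ a b, pvCell (pvLoopX graph dv st x).1 a b =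
        if a = x ∧ b ∈ (PySem.Dict.mk graph).keys then
          ((pvVs graph x).map (fun v => pvCand graph dv x v b)).foldl min (pvCell st.1 x b)
        else pvCell st.1 a b :=
      pvFoldV_cell graph dv x _ hnodes (pvVs graph x) st
    have hfresh' : ∀ z ∈ xs', ∀ y, pvCell (pvLoopX graph dv st x).1 z y = pvCell dv z y := by
      intro z hz y
      rw [hcell, if_neg (by rintro ⟨h1, -⟩; exact hxs.1 (h1 ▸ hz))]
      exact hfresh z (List.mem_cons_of_mem _ hz) y
    rw [ih hxs.2 _ hfresh']
    have hflag : ((pvLoopX graph dv st x).2.1 = true ↔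
        st.2.1 = true ∨ ∃ y ∈ (PySem.Dict.mk graph).keys, ∃ v ∈ pvVs graph x,
          pvCand graph dv x v y < pvCell st.1 x y) :=
      pvFoldV_flag graph dv x _ hnodes (pvVs graph x) st
    constructor
    · rintro (h | ⟨z, hz, y, hy, hch⟩)
      · rcases hflag.mp h with h' | ⟨y, hy, v, hv, hlt⟩
        · exact Or.inl h'
        · rw [hfresh x (List.mem_cons_self ..) y] at hlt
          exact Or.inr ⟨x, List.mem_cons_self .., y, hy, v, hv, hlt⟩
      · exact Or.inr ⟨z, List.mem_cons_of_mem _ hz, y, hy, hch⟩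
    · rintro (h | ⟨z, hz, y, hy, hch⟩)
      · exact Or.inl (hflag.mpr (Or.inl h))
      · rcases List.mem_cons.mp hz with hx1 | hx1
        · refine Or.inl (hflag.mpr (Or.inr ⟨y, hy, ?_⟩))
          rw [hfresh x (List.mem_cons_self ..) y]
          exact hx1 ▸ hch
        · exact Or.inr ⟨z, hx1, y, hy, hch⟩


theorem pvStepB_nil (graph dv : List (String × List (String × Int))) (x : String)
    (m : List (String × List (String × Int))) (y : String) (h : pvVs graph x = []) :
    pvStepB graph dv x m y = m := by
  unfold pvStepB
  rw [h]
  rfl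

theorem pvFoldlMin_comm (l : List Int) : ∀ (a c : Int),
    min a (l.foldl min c) = l.foldl min (min a c) := by
  induction l with
  | nil => intro a c; rfl
  | cons d t ih =>
    intro a c
    rw [List.foldl_cons, List.foldl_cons, ih, ← min_assoc]

theorem pvStepB_cell (graph dv : List (String × List (String × Int))) (x : String)
    (m : List (String × List (String × Int))) (y : String) (h : pvVs graph x ≠ [])
    (x' y' : String) :
    pvCell (pvStepB graph dv x m y) x' y' =
      if x' = x ∧ y' = y then pvRelax graph dv x y else pvCell m x' y' := by
  obtain ⟨v, vs', hvs⟩ := List.exists_cons_of_ne_nil h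
  unfold pvStepB
  simp only [hvs, List.map_cons, PySem.List.min?_id_cons]
  rw [pvCell_setCell]
  congr 1
  unfold pvRelax pvCand
  rw [hvs, List.map_cons, List.foldl_cons, pvFoldlMin_comm]

theorem pvFoldYB_nil (graph dv : List (String × List (String × Int))) (x : String)
    (hv : pvVs graph x = []) (ys : List String) :
    ∀ (m : List (String × List (String × Int))), ys.foldl (pvStepB graph dv x) m = m := by
  induction ys with
  | nil => intro m; rfl
  | cons y yt ih =>
    intro m
    rw [List.foldl_cons, pvStepB_nil graph dv x m y hv, ih]

theorem pvFoldYB_cell (graph dv : List (String × List (String × Int))) (x : String)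
    (h : pvVs graph x ≠ []) (ys : List String) (hys : ys.Nodup) :
    ∀ (m : List (String × List (String × Int))) (x' y' : String),
    pvCell (ys.foldl (pvStepB graph dv x) m) x' y' =
      if x' = x ∧ y' ∈ ys then pvRelax graph dv x y' else pvCell m x' y' := by
  induction ys with
  | nil => intro m x' y'; rw [List.foldl_nil, if_neg (by simp)]
  | cons y ys' ih =>
    rw [List.nodup_cons] at hys
    intro m x' y'
    rw [List.foldl_cons, ih hys.2]
    by_cases hc : x' = x ∧ y' ∈ ys'
    · rw [if_pos hc, if_pos ⟨hc.1, List.mem_cons_of_mem _ hc.2⟩]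
    · rw [if_neg hc, pvStepB_cell graph dv x m y h]
      by_cases hd : x' = x ∧ y' = y
      · rw [if_pos hd, if_pos ⟨hd.1, hd.2 ▸ List.mem_cons_self ..⟩, hd.2]
      · rw [if_neg hd, if_neg (by simp only [List.mem_cons]; tauto)]

theorem pvFoldXB_cell (graph dv : List (String × List (String × Int)))
    (ys : List String) (hys : ys.Nodup) :
    ∀ (xs : List String), xs.Nodup →
    ∀ (m : List (String × List (String × Int))) (x' y' : String),
    pvCell (xs.foldl (fun m x => ys.foldl (pvStepB graph dv x) m) m) x' y' =
      if x' ∈ xs ∧ y' ∈ ys ∧ pvVs graph x' ≠ [] then pvRelax graph dv x' y'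
      else pvCell m x' y' := by
  intro xs
  induction xs with
  | nil => intro _ m x' y'; rw [List.foldl_nil, if_neg (by simp)]
  | cons x xs' ih =>
    intro hxs m x' y'
    rw [List.nodup_cons] at hxs
    rw [List.foldl_cons, ih hxs.2]
    by_cases hc : x' ∈ xs' ∧ y' ∈ ys ∧ pvVs graph x' ≠ []
    · rw [if_pos hc, if_pos ⟨List.mem_cons_of_mem _ hc.1, hc.2⟩]
    · rw [if_neg hc]
      by_cases hv : pvVs graph x = []
      · rw [pvFoldYB_nil graph dv x hv ys m]
        rw [if_neg ?_]
        rintro ⟨h1, h2, h3⟩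
        rcases List.mem_cons.mp h1 with h1 | h1
        · exact h3 (by rw [h1]; exact hv)
        · exact hc ⟨h1, h2, h3⟩
      · rw [pvFoldYB_cell graph dv x hv ys hys]
        by_cases hd : x' = x ∧ y' ∈ ys
        · rw [if_pos hd, if_pos ⟨hd.1 ▸ List.mem_cons_self .., hd.2, hd.1 ▸ hv⟩, hd.1]
        · rw [if_neg hd, if_neg ?_]
          rintro ⟨h1, h2, h3⟩
          rcases List.mem_cons.mp h1 with h1 | h1
          · exact hd ⟨h1, h2⟩
          · exact hc ⟨h1, h2, h3⟩


theorem pvFoldYB_shape (graph dv : List (String × List (String × Int))) (x : String)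
    (hnd : (dv.map Prod.fst).Nodup) (hx : x ∈ dv.map Prod.fst) :
    ∀ (ys : List String), (∀ y ∈ ys, y ∈ (pvRow dv x).map Prod.fst) →
    ∀ (m : List (String × List (String × Int))), pvShape dv m →
    pvShape dv (ys.foldl (pvStepB graph dv x) m) := by
  intro ys
  induction ys with
  | nil => intro _ m h; exact h
  | cons y ys' ih =>
    intro hy m h
    rw [List.foldl_cons]
    refine ih (fun z hz => hy z (List.mem_cons_of_mem _ hz)) _ ?_
    by_cases hv : pvVs graph x = []
    · rw [pvStepB_nil graph dv x m y hv]; exact h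
    · unfold pvStepB
      obtain ⟨v, vs', hvs⟩ := List.exists_cons_of_ne_nil hv
      simp only [hvs, List.map_cons, PySem.List.min?_id_cons]
      exact pvShape_setCell h hnd x y _ hx (hy y (List.mem_cons_self ..))

theorem pvFoldXB_shape (graph dv : List (String × List (String × Int)))
    (hnd : (dv.map Prod.fst).Nodup) (ys : List String) :
    ∀ (xs : List String),
    (∀ x ∈ xs, pvVs graph x ≠ [] → x ∈ dv.map Prod.fst ∧
      ∀ y ∈ ys, y ∈ (pvRow dv x).map Prod.fst) →
    ∀ (m : List (String × List (String × Int))), pvShape dv m →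
    pvShape dv (xs.foldl (fun m x => ys.foldl (pvStepB graph dv x) m) m) := by
  intro xs
  induction xs with
  | nil => intro _ m h; exact h
  | cons x xs' ih =>
    intro hpre m h
    rw [List.foldl_cons]
    refine ih (fun z hz => hpre z (List.mem_cons_of_mem _ hz)) _ ?_
    by_cases hv : pvVs graph x = []
    · rw [pvFoldYB_nil graph dv x hv ys m]; exact h
    · rcases hpre x (List.mem_cons_self ..) hv with ⟨hx, hy⟩
      exact pvFoldYB_shape graph dv x hnd hx ys hy m h

theorem pvFoldlMin_lt_iff (l : List Int) (a : Int) :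
    l.foldl min a < a ↔ ∃ b ∈ l, b < a := by
  constructor
  · intro h
    rcases PySem.List.foldl_min_mem l a with he | hm
    · rw [he] at h; exact absurd h (lt_irrefl a)
    · exact ⟨_, hm, h⟩
  · rintro ⟨b, hb, hba⟩
    have := (PySem.List.foldl_min_le l a).2 b hb
    omega

theorem pvRelax_lt_iff (graph dv : List (String × List (String × Int))) (x y : String) :
    pvRelax graph dv x y < pvCell dv x y ↔ pvChanged graph dv x y := by
  unfold pvRelax pvChanged
  rw [pvFoldlMin_lt_iff]
  constructor
  · rintro ⟨b, hb, hba⟩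
    rcases List.mem_map.mp hb with ⟨v, hv, rfl⟩
    exact ⟨v, hv, hba⟩
  · rintro ⟨v, hv, hlt⟩
    exact ⟨_, List.mem_map.mpr ⟨v, hv, rfl⟩, hlt⟩

theorem pvRelax_empty (graph dv : List (String × List (String × Int))) (x y : String)
    (h : pvVs graph x = []) : pvRelax graph dv x y = pvCell dv x y := by
  unfold pvRelax
  rw [h]
  rfl

theorem pvChanged_ne_nil {graph dv : List (String × List (String × Int))} {x y : String}
    (h : pvChanged graph dv x y) : pvVs graph x ≠ [] := by
  rcases h with ⟨v, hv, -⟩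
  exact List.ne_nil_of_mem hv

theorem pvVs_ne_iff (graph : List (String × List (String × Int))) (x : String) :
    pvVs graph x ≠ [] ↔ pvRow graph x ≠ [] := by
  unfold pvVs
  constructor
  · intro h hc
    exact h (by rw [hc]; rfl)
  · intro h hc
    exact h (List.map_eq_nil_iff.mp hc)

theorem pvRow_mem (m : List (String × List (String × Int))) (x : String)
    (h : x ∈ m.map Prod.fst) : (x, pvRow m x) ∈ m := by
  induction m with
  | nil => simp at h
  | cons p t ih =>
    by_cases hp : p.1 = x
    · rw [pvRow_cons, if_pos hp]
      have hpx : (x, p.2) = p := Prod.ext hp.symm rfl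
      rw [hpx]
      exact List.mem_cons_self ..
    · rw [pvRow_cons, if_neg hp]
      rw [List.map_cons, List.mem_cons] at h
      rcases h with h | h
      · exact absurd h.symm hp
      · exact List.mem_cons_of_mem _ (ih h)

theorem pvScanNodup (xs inner : List String) (p : String → String → Bool)
    (hxs : xs.Nodup) (hin : inner.Nodup) :
    (xs.flatMap (fun x => ((inner.filter (p x)).map (fun y => (x, y))))).Nodup := by
  induction xs with
  | nil => simp
  | cons x xs' ih =>
    rw [List.nodup_cons] at hxs
    rw [List.flatMap_cons]
    refine List.Nodup.append ?_ (ih hxs.2) ?_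
    · exact ((hin.filter _).map (fun a b hab => congrArg Prod.snd hab))
    · intro a ha hb
      rcases List.mem_map.mp ha with ⟨y, -, rfl⟩
      rcases List.mem_flatMap.mp hb with ⟨z, hz, hmz⟩
      rcases List.mem_map.mp hmz with ⟨w, -, hw⟩
      have : x = z := congrArg Prod.fst hw.symm
      exact hxs.1 (this ▸ hz)

theorem pvScanMem (xs inner : List String) (p : String → String → Bool) (a : String × String) :
    a ∈ xs.flatMap (fun x => ((inner.filter (p x)).map (fun y => (x, y)))) ↔
      a.1 ∈ xs ∧ a.2 ∈ inner ∧ p a.1 a.2 = true := by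
  rw [List.mem_flatMap]
  constructor
  · rintro ⟨x, hx, hm⟩
    rcases List.mem_map.mp hm with ⟨y, hy, rfl⟩
    rcases List.mem_filter.mp hy with ⟨hy1, hy2⟩
    exact ⟨hx, hy1, hy2⟩
  · rintro ⟨h1, h2, h3⟩
    exact ⟨a.1, h1, List.mem_map.mpr ⟨a.2, List.mem_filter.mpr ⟨h2, h3⟩, rfl⟩⟩

theorem pvScanCongr (xs inner : List String) (p q : String → String → Bool)
    (h : ∀ x ∈ xs, ∀ y ∈ inner, p x y = q x y) :
    xs.flatMap (fun x => ((inner.filter (p x)).map (fun y => (x, y)))) =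
    xs.flatMap (fun x => ((inner.filter (q x)).map (fun y => (x, y)))) := by
  rw [List.flatMap_def, List.flatMap_def]
  congr 1
  apply List.map_congr_left
  intro x hx
  rw [List.filter_congr (fun y hy => h x hx y hy)]


theorem pvMain (graph dv : List (String × List (String × Int)))
    (hgn : (graph.map Prod.fst).Nodup) (hdn : (dv.map Prod.fst).Nodup)
    (hrows : ∀ p ∈ dv, (p.2.map Prod.fst).Nodup)
    (hacc : ∀ p ∈ graph, p.2 ≠ [] → p.1 ∈ dv.map Prod.fst ∧
      (∀ y ∈ graph.map Prod.fst, y ∈ (pvRow dv p.1).map Prod.fst) ∧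
      (∀ q ∈ p.2, q.1 ∈ dv.map Prod.fst ∧ ∀ y ∈ graph.map Prod.fst,
        y ∈ (pvRow dv q.1).map Prod.fst)) :
    distance_vector_step graph dv = distance_vector_step_alt graph dv := by
  have hnodes : ((PySem.Dict.mk graph).keys).Nodup := hgn
  have hpres : ∀ x ∈ (PySem.Dict.mk graph).keys, pvVs graph x ≠ [] →
      x ∈ dv.map Prod.fst ∧ ∀ y ∈ (PySem.Dict.mk graph).keys, y ∈ (pvRow dv x).map Prod.fst := by
    intro x hx hvne
    have hxg : x ∈ graph.map Prod.fst := hx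
    have hmem := pvRow_mem graph x hxg
    have hrne : pvRow graph x ≠ [] := (pvVs_ne_iff graph x).mp hvne
    rcases hacc (x, pvRow graph x) hmem hrne with ⟨h1, h2, -⟩
    exact ⟨h1, h2⟩
  have hfresh0 : ∀ x ∈ (PySem.Dict.mk graph).keys, ∀ y,
      pvCell ((dv, false, (PySem.Set.empty : PySem.Set (String × String))) :
        (List (String × List (String × Int))) × Bool × PySem.Set (String × String)).1 x y =
        pvCell dv x y := fun _ _ _ => rfl
  have hAcell := pvFoldX_cell graph dv hnodes ((PySem.Dict.mk graph).keys) hnodes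
    ((dv, false, (PySem.Set.empty : PySem.Set (String × String)))) hfresh0
  have hAmem := pvFoldX_mem graph dv hnodes ((PySem.Dict.mk graph).keys) hnodes
    ((dv, false, (PySem.Set.empty : PySem.Set (String × String)))) hfresh0
  have hAflag := pvFoldX_flag graph dv hnodes ((PySem.Dict.mk graph).keys) hnodes
    ((dv, false, (PySem.Set.empty : PySem.Set (String × String)))) hfresh0
  have hAshape := pvFoldX_shape graph dv hdn ((PySem.Dict.mk graph).keys) hpres
    ((dv, false, (PySem.Set.empty : PySem.Set (String × String)))) (pvShape_refl dv)
  have hBcell := pvFoldXB_cell graph dv ((PySem.Dict.mk graph).keys) hnodes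
    ((PySem.Dict.mk graph).keys) hnodes dv
  have hBshape := pvFoldXB_shape graph dv hdn ((PySem.Dict.mk graph).keys)
    ((PySem.Dict.mk graph).keys) hpres dv (pvShape_refl dv)
  -- the two relaxed matrices agree cellwise
  have hcells : ∀ x y,
      pvCell (((PySem.Dict.mk graph).keys).foldl (pvLoopX graph dv)
        ((dv, false, (PySem.Set.empty : PySem.Set (String × String))))).1 x y =
      pvCell (((PySem.Dict.mk graph).keys).foldl
        (fun m x => ((PySem.Dict.mk graph).keys).foldl (pvStepB graph dv x) m) dv) x y := by
    intro x y
    rw [hAcell x y, hBcell x y]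
    by_cases h1 : x ∈ (PySem.Dict.mk graph).keys ∧ y ∈ (PySem.Dict.mk graph).keys
    · rw [if_pos h1]
      by_cases h2 : pvVs graph x = []
      · rw [if_neg (by tauto), pvRelax_empty graph dv x y h2]
      · rw [if_pos ⟨h1.1, h1.2, h2⟩]
    · rw [if_neg h1, if_neg (by tauto)]
  have hM : (((PySem.Dict.mk graph).keys).foldl (pvLoopX graph dv)
        ((dv, false, (PySem.Set.empty : PySem.Set (String × String))))).1 =
      ((PySem.Dict.mk graph).keys).foldl
        (fun m x => ((PySem.Dict.mk graph).keys).foldl (pvStepB graph dv x) m) dv :=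
    pvEq_of_shape_cell hdn hrows hAshape hBshape hcells
  -- the B-side filter predicate decides pvChanged
  have hBpred : ∀ x ∈ (PySem.Dict.mk graph).keys, ∀ y ∈ (PySem.Dict.mk graph).keys,
      ((!(pvRow graph x).isEmpty &&
        decide (pvCell (((PySem.Dict.mk graph).keys).foldl
          (fun m x => ((PySem.Dict.mk graph).keys).foldl (pvStepB graph dv x) m) dv) x y <
          pvCell dv x y)) = true ↔ pvChanged graph dv x y) := by
    intro x hx y hy
    rw [Bool.and_eq_true, Bool.not_eq_true']
    constructor
    · rintro ⟨h1, h2⟩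
      have hrne : pvRow graph x ≠ [] := by
        intro hc; rw [hc] at h1; exact absurd h1 (by simp)
      have hv : pvVs graph x ≠ [] := (pvVs_ne_iff graph x).mpr hrne
      have h2' := of_decide_eq_true h2
      rw [hBcell x y, if_pos ⟨hx, hy, hv⟩] at h2'
      exact (pvRelax_lt_iff graph dv x y).mp h2'
    · intro h
      have hv := pvChanged_ne_nil h
      have hrne := (pvVs_ne_iff graph x).mp hv
      refine ⟨by simpa using hrne, ?_⟩
      apply decide_eq_true
      rw [hBcell x y, if_pos ⟨hx, hy, hv⟩]
      exact (pvRelax_lt_iff graph dv x y).mpr h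
  -- the A-side membership test decides pvChanged too
  have hApred : ∀ x ∈ (PySem.Dict.mk graph).keys, ∀ y ∈ (PySem.Dict.mk graph).keys,
      (PySem.Set.contains (((PySem.Dict.mk graph).keys).foldl (pvLoopX graph dv)
        ((dv, false, (PySem.Set.empty : PySem.Set (String × String))))).2.2 (x, y) = true ↔
        pvChanged graph dv x y) := by
    intro x hx y hy
    rw [PySem.Set.contains_iff, hAmem (x, y)]
    constructor
    · rintro (h | ⟨-, -, h⟩)
      · exact absurd h (by simp [PySem.Set.empty])
      · exact h
    · intro h
      exact Or.inr ⟨hx, hy, h⟩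
  have hpredEq : ∀ x ∈ (PySem.Dict.mk graph).keys, ∀ y ∈ (PySem.Dict.mk graph).keys,
      PySem.Set.contains (((PySem.Dict.mk graph).keys).foldl (pvLoopX graph dv)
        ((dv, false, (PySem.Set.empty : PySem.Set (String × String))))).2.2 (x, y) =
      (!(pvRow graph x).isEmpty &&
        decide (pvCell (((PySem.Dict.mk graph).keys).foldl
          (fun m x => ((PySem.Dict.mk graph).keys).foldl (pvStepB graph dv x) m) dv) x y <
          pvCell dv x y)) := by
    intro x hx y hy
    exact Bool.coe_iff_coe.mp ((hApred x hx y hy).trans (hBpred x hx y hy).symm)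
  have hser := pvScanCongr ((PySem.Dict.mk graph).keys) ((PySem.Dict.mk graph).keys)
    (fun x y => PySem.Set.contains (((PySem.Dict.mk graph).keys).foldl (pvLoopX graph dv)
        ((dv, false, (PySem.Set.empty : PySem.Set (String × String))))).2.2 (x, y))
    (fun x y => (!(pvRow graph x).isEmpty &&
        decide (pvCell (((PySem.Dict.mk graph).keys).foldl
          (fun m x => ((PySem.Dict.mk graph).keys).foldl (pvStepB graph dv x) m) dv) x y <
          pvCell dv x y)))
    hpredEq
  have hnodupL := pvScanNodup ((PySem.Dict.mk graph).keys) ((PySem.Dict.mk graph).keys)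
    (fun x y => (!(pvRow graph x).isEmpty &&
        decide (pvCell (((PySem.Dict.mk graph).keys).foldl
          (fun m x => ((PySem.Dict.mk graph).keys).foldl (pvStepB graph dv x) m) dv) x y <
          pvCell dv x y)))
    hnodes hnodes
  have hofl := PySem.Set.ofList_eq_self_of_nodup _ hnodupL
  -- flags agree
  have hLne : (((PySem.Dict.mk graph).keys).flatMap (fun x =>
      ((((PySem.Dict.mk graph).keys).filter (fun y => (!(pvRow graph x).isEmpty &&
        decide (pvCell (((PySem.Dict.mk graph).keys).foldl
          (fun m x => ((PySem.Dict.mk graph).keys).foldl (pvStepB graph dv x) m) dv) x y <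
          pvCell dv x y)))).map (fun y => (x, y)))) ≠ [] ↔
      ∃ x ∈ (PySem.Dict.mk graph).keys, ∃ y ∈ (PySem.Dict.mk graph).keys,
        pvChanged graph dv x y) := by
    constructor
    · intro h
      obtain ⟨a, ha⟩ := List.exists_mem_of_ne_nil _ h
      rw [pvScanMem] at ha
      rcases ha with ⟨h1, h2, h3⟩
      exact ⟨a.1, h1, a.2, h2, (hBpred a.1 h1 a.2 h2).mp h3⟩
    · rintro ⟨x, hx, y, hy, h⟩
      refine List.ne_nil_of_mem (a := (x, y)) ?_
      rw [pvScanMem]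
      exact ⟨hx, hy, (hBpred x hx y hy).mpr h⟩
  have hflagA : ((((PySem.Dict.mk graph).keys).foldl (pvLoopX graph dv)
      ((dv, false, (PySem.Set.empty : PySem.Set (String × String))))).2.1 = true ↔
      ∃ x ∈ (PySem.Dict.mk graph).keys, ∃ y ∈ (PySem.Dict.mk graph).keys,
        pvChanged graph dv x y) := by
    rw [hAflag]
    constructor
    · rintro (h | h)
      · exact absurd h (by simp)
      · exact h
    · exact Or.inr
  -- assemble the tuple equality
  show ((((PySem.Dict.mk graph).keys).foldl (pvLoopX graph dv)
      ((dv, false, (PySem.Set.empty : PySem.Set (String × String))))).1,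
    (((PySem.Dict.mk graph).keys).foldl (pvLoopX graph dv)
      ((dv, false, (PySem.Set.empty : PySem.Set (String × String))))).2.1,
    ((PySem.Dict.mk graph).keys).flatMap (fun x =>
      ((((PySem.Dict.mk graph).keys).filter (fun y =>
        PySem.Set.contains (((PySem.Dict.mk graph).keys).foldl (pvLoopX graph dv)
          ((dv, false, (PySem.Set.empty : PySem.Set (String × String))))).2.2 (x, y))).map
        (fun y => (x, y))))) =
    (((PySem.Dict.mk graph).keys).foldl
        (fun m x => ((PySem.Dict.mk graph).keys).foldl (pvStepB graph dv x) m) dv,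
    !(PySem.Set.ofList (((PySem.Dict.mk graph).keys).flatMap (fun x =>
        ((((PySem.Dict.mk graph).keys).filter (fun y => (!(pvRow graph x).isEmpty &&
          decide (pvCell (((PySem.Dict.mk graph).keys).foldl
            (fun m x => ((PySem.Dict.mk graph).keys).foldl (pvStepB graph dv x) m) dv) x y <
            pvCell dv x y)))).map (fun y => (x, y)))))).isEmpty,
    PySem.Set.ofList (((PySem.Dict.mk graph).keys).flatMap (fun x =>
        ((((PySem.Dict.mk graph).keys).filter (fun y => (!(pvRow graph x).isEmpty &&
          decide (pvCell (((PySem.Dict.mk graph).keys).foldl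
            (fun m x => ((PySem.Dict.mk graph).keys).foldl (pvStepB graph dv x) m) dv) x y <
            pvCell dv x y)))).map (fun y => (x, y))))))
  rw [Prod.mk.injEq, Prod.mk.injEq]
  refine ⟨hM, ?_, ?_⟩
  · rw [hofl]
    have hBne : ((!(((PySem.Dict.mk graph).keys).flatMap (fun x =>
        ((((PySem.Dict.mk graph).keys).filter (fun y => (!(pvRow graph x).isEmpty &&
          decide (pvCell (((PySem.Dict.mk graph).keys).foldl
            (fun m x => ((PySem.Dict.mk graph).keys).foldl (pvStepB graph dv x) m) dv) x y <
            pvCell dv x y)))).map (fun y => (x, y))))).isEmpty) = true ↔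
        ∃ x ∈ (PySem.Dict.mk graph).keys, ∃ y ∈ (PySem.Dict.mk graph).keys,
          pvChanged graph dv x y) := by
      have hne : ∀ (l : List (String × String)), ((!l.isEmpty) = true ↔ l ≠ []) := by
        intro l; cases l <;> simp
      exact (hne _).trans hLne
    exact Bool.coe_iff_coe.mp (hflagA.trans hBne.symm)
  · rw [hofl]
    exact hser

-- ===== VERDICT (by name: the statement is the Claim_ definition above) =====
theorem distance_vector_step_spec : Claim_equal_distance_vector_step := by
  intro graph dv _ hpre
  obtain ⟨hgn, hdn, hrows, hacc⟩ := hpre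
  exact pvMain graph dv hgn hdn hrows hacc
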